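-- pv_equiv track=rewrite | github.com/Nathaniel-St-S/Operating-Systems | Homework/Assignment3/table_script.py | fcfs_schedule
-- ===== SOURCE A (Python) =====
-- from typing import List, Dict, Tuple
--
-- def fcfs_schedule(processes: Dict[str, Tuple[int, int]]):
--     """
--     Non-preemptive First-Come, First-Served scheduling.
--     processes: dict of pid -> (arrival, burst)
--     Returns: (timeline, metrics)
--       - timeline: list of (start, end, pid) sorted by start
--       - metrics: dict pid -> metrics dict
--     """
--     # Sort by arrival, then by name for stable order
--     items = sorted(processes.items(), key=lambda kv: (kv[1][0], kv[0]))
--     t = 0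
--     timeline = []
--     first_start = {}
--     completion = {}
--
--     for pid, (arrival, burst) in items:
--         if t < arrival:
--             t = arrival
--         start = t
--         end = t + burst
--         timeline.append((start, end, pid))
--         t = end
--         completion[pid] = end
--         first_start.setdefault(pid, start)
--
--     metrics = {}
--     for pid, (arrival, burst) in processes.items():
--         comp = completion[pid]
--         turnaround = comp - arrival
--         waiting = turnaround - burst
--         response = first_start[pid] - arrival
--         metrics[pid] = {
--             "Arrival": arrival,
--             "Burst": burst,
--             "Completion": comp,
--             "Turnaround": turnaround,
--             "Waiting": waiting,
--             "Response": response,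
--         }
--     return sorted(timeline, key=lambda x: x[0]), metrics
-- ===== SOURCE B (Python) =====
-- def fcfs_schedule(processes):
--     """FCFS via a closed form: with P_i = sum of bursts before item i in
--     (arrival, pid) order and m_i = max(0, max_{j<=i}(arrival_j - P_j)),
--     item i starts at P_i + m_i.  Staged passes (prefix sums, running max,
--     then comprehensions) replace A's clock simulation and its two
--     bookkeeping dicts."""
--     items = sorted(processes.items(), key=lambda kv: (kv[1][0], kv[0]))
--     # pass 1: burst prefix sums (P_i = total burst of the items before i)
--     prefix = []
--     p = 0
--     for _, (_, burst) in items: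
--         prefix.append(p)
--         p += burst
--     # pass 2: running max of the slack terms (arrival_j - P_j), floored at 0
--     slack = []
--     m = 0
--     for (_, (arrival, _)), p in zip(items, prefix):
--         m = max(m, arrival - p)
--         slack.append(m)
--     starts = {pid: p + m for (pid, _), p, m in zip(items, prefix, slack)}
--     timeline = [(starts[pid], starts[pid] + burst, pid) for pid, (_, burst) in items]
--     metrics = {pid: {"Arrival": arrival, "Burst": burst,
--                      "Completion": starts[pid] + burst,
--                      "Turnaround": starts[pid] + burst - arrival,
--                      "Waiting": starts[pid] - arrival,
--                      "Response": starts[pid] - arrival}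
--                for pid, (arrival, burst) in processes.items()}
--     return sorted(timeline, key=lambda x: x[0]), metrics
-- ===== Notes on version B (the rewrite author's own statement) =====
-- stated objective: alternative
-- what changed: B computes every start time in closed form -- a pass of burst prefix sums P_i and a pass taking the running max of (arrival_i - P_i), with start_i = P_i + max -- instead of A's clock simulation; timeline and metrics are then comprehensions over a single starts dict, eliminating A's in-loop timeline building and its first_start/completion dicts and second subtract loop.
import Mathlib
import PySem

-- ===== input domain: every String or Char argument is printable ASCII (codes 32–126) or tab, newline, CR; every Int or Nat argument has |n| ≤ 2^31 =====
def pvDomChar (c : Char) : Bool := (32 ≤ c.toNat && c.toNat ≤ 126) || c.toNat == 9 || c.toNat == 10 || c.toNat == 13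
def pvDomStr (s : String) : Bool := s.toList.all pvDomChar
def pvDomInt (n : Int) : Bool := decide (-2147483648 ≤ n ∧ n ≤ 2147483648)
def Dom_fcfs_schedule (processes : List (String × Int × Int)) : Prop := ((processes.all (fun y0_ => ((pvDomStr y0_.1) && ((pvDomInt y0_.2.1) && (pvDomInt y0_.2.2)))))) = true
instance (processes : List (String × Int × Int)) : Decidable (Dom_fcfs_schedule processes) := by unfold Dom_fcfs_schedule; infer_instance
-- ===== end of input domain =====

-- B replaces A's clock simulation by a closed form: burst prefix sums plus a running max
-- of (arrival - prefix) give every start time; staged passes, no bookkeeping dicts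
-- (objective: alternative).

-- ===== PORT A =====
-- loop body of A's first for-loop: state (t, timeline, first_start, completion)
def pvAStep (s : Int × List (Int × Int × String) × PySem.Dict String Int × PySem.Dict String Int)
    (kv : String × Int × Int) :
    Int × List (Int × Int × String) × PySem.Dict String Int × PySem.Dict String Int :=
  let t := if s.1 < kv.2.1 then kv.2.1 else s.1   -- if t < arrival: t = arrival
  let start := t
  let en := t + kv.2.2
  (en, s.2.1 ++ [(start, en, kv.1)], s.2.2.1.setdefault kv.1 start, s.2.2.2.insert kv.1 en)

def fcfs_schedule (processes : List (String × Int × Int)) : (List (Int × Int × String)) × (List (String × List (String × Int))) :=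
  let items := PySem.List.sorted2 processes (fun kv => kv.2.1) (fun kv => kv.1)
  let st := items.foldl pvAStep ((0:Int), [], PySem.Dict.empty, PySem.Dict.empty)
  let first_start := st.2.2.1
  let completion := st.2.2.2
  let metrics := processes.foldl (fun m kv =>
      -- completion[pid] / first_start[pid]: total via getD; present for every pid (Pre_ gives unique pids)
      let comp := completion.getD kv.1 0
      let turnaround := comp - kv.2.1
      let waiting := turnaround - kv.2.2
      let response := first_start.getD kv.1 0 - kv.2.1
      m.insert kv.1 [("Arrival", kv.2.1), ("Burst", kv.2.2), ("Completion", comp),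
                     ("Turnaround", turnaround), ("Waiting", waiting), ("Response", response)])
    PySem.Dict.empty
  (PySem.List.sorted st.2.1 (fun x => x.1), metrics.items)

-- ===== PORT B =====
-- pass 1 body: state (prefix list, running burst sum p)
def pvPrefixStep (s : List Int × Int) (kv : String × Int × Int) : List Int × Int :=
  (s.1 ++ [s.2], s.2 + kv.2.2)
-- pass 2 body: state (slack list, running max m); input ((pid,(arrival,burst)), p)
def pvSlackStep (s : List Int × Int) (x : (String × Int × Int) × Int) : List Int × Int :=
  let m := max s.2 (x.1.2.1 - x.2)
  (s.1 ++ [m], m)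

def fcfs_schedule_alt (processes : List (String × Int × Int)) : (List (Int × Int × String)) × (List (String × List (String × Int))) :=
  let items := PySem.List.sorted2 processes (fun kv => kv.2.1) (fun kv => kv.1)
  let prefix_ := (items.foldl pvPrefixStep ([], 0)).1
  let slack := ((items.zip prefix_).foldl pvSlackStep ([], 0)).1
  -- starts = {pid: p + m for (pid, _), p, m in zip(items, prefix, slack)}
  let starts := (items.zip (prefix_.zip slack)).foldl
      (fun d x => d.insert x.1.1 (x.2.1 + x.2.2)) (PySem.Dict.empty : PySem.Dict String Int)
  let timeline := items.map (fun kv =>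
      let s0 := starts.getD kv.1 0
      (s0, s0 + kv.2.2, kv.1))
  let metrics := processes.map (fun kv =>
      let s0 := starts.getD kv.1 0
      (kv.1, [("Arrival", kv.2.1), ("Burst", kv.2.2), ("Completion", s0 + kv.2.2),
              ("Turnaround", s0 + kv.2.2 - kv.2.1), ("Waiting", s0 - kv.2.1), ("Response", s0 - kv.2.1)]))
  (PySem.List.sorted timeline (fun x => x.1), metrics)

-- ===== PRECONDITION & SPEC =====
-- Pre_ excludes association lists with duplicate pids: the Python argument is a dict, whose
-- keys are unique, so such lists encode no Python input at all.
def Pre_fcfs_schedule (processes : List (String × Int × Int)) : Prop :=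
  (processes.map Prod.fst).Nodup
instance (processes : List (String × Int × Int)) : Decidable (Pre_fcfs_schedule processes) := by
  unfold Pre_fcfs_schedule; infer_instance
def pvWitness_fcfs_schedule : (List (String × Int × Int)) := [("a", 0, 3), ("b", 2, 1)]

def Spec_fcfs_schedule (processes : List (String × Int × Int)) (out : (List (Int × Int × String)) × (List (String × List (String × Int)))) : Prop := out = fcfs_schedule_alt processes
instance (processes : List (String × Int × Int)) (out : (List (Int × Int × String)) × (List (String × List (String × Int)))) : Decidable (Spec_fcfs_schedule processes out) := by unfold Spec_fcfs_schedule; infer_instance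

-- ===== CLAIM (what is proved, stated in full; the proofs are below) =====
def Claim_equal_fcfs_schedule : Prop := ∀ (processes : List (String × Int × Int)), Dom_fcfs_schedule processes → Pre_fcfs_schedule processes → Spec_fcfs_schedule processes (fcfs_schedule processes)

-- ===== LEMMAS AND PROOFS =====

-- the schedule A's loop computes: (pid, start, burst) for each item, in order
def pvSched (t : Int) : List (String × Int × Int) → List (String × Int × Int)
  | [] => []
  | kv :: l => (kv.1, max t kv.2.1, kv.2.2) :: pvSched (max t kv.2.1 + kv.2.2) l

-- the prefix-sum and running-max lists B's two passes produce
def pvPrefixList (p : Int) : List (String × Int × Int) → List Int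
  | [] => []
  | kv :: l => p :: pvPrefixList (p + kv.2.2) l

def pvSlackList (m p : Int) : List (String × Int × Int) → List Int
  | [] => []
  | kv :: l => max m (kv.2.1 - p) :: pvSlackList (max m (kv.2.1 - p)) (p + kv.2.2) l

lemma pv_if_eq_max (t a : Int) : (if t < a then a else t) = max t a := by
  rw [max_def]; split_ifs <;> omega

-- A's fold appends exactly the schedule's timeline
lemma pv_afold_timeline (l : List (String × Int × Int)) :
    ∀ (t : Int) (tl : List (Int × Int × String)) (fs comp : PySem.Dict String Int),
    (l.foldl pvAStep (t, tl, fs, comp)).2.1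
      = tl ++ (pvSched t l).map (fun x => (x.2.1, x.2.1 + x.2.2, x.1)) := by
  induction l with
  | nil => intro t tl fs comp; simp [pvSched]
  | cons kv l ih =>
      intro t tl fs comp
      simp only [List.foldl_cons, pvAStep, pv_if_eq_max, pvSched, List.map_cons]
      rw [ih]
      simp

lemma pv_mem_sched (l : List (String × Int × Int)) :
    ∀ (t : Int) (kv : String × Int × Int), kv ∈ l → ∃ s, (kv.1, s, kv.2.2) ∈ pvSched t l := by
  induction l with
  | nil => intro _ _ h; cases h
  | cons hd l ih =>
      intro t kv h
      rcases List.mem_cons.1 h with h | h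
      · exact ⟨max t hd.2.1, by rw [h]; exact List.mem_cons_self ..⟩
      · obtain ⟨s, hs⟩ := ih (max t hd.2.1 + hd.2.2) kv h
        exact ⟨s, List.mem_cons_of_mem _ hs⟩

lemma pv_sched_fst (l : List (String × Int × Int)) :
    ∀ t, (pvSched t l).map Prod.fst = l.map Prod.fst := by
  induction l with
  | nil => intro _; rfl
  | cons kv l ih => intro t; simp [pvSched, ih]

-- pass 1: the fold produces the prefix-sum list
lemma pv_prefix_fold (l : List (String × Int × Int)) :
    ∀ (acc : List Int) (p : Int),
    l.foldl pvPrefixStep (acc, p) = (acc ++ pvPrefixList p l, p + (l.map (fun kv => kv.2.2)).sum) := by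
  induction l with
  | nil => intro acc p; simp [pvPrefixList]
  | cons kv l ih =>
      intro acc p
      simp only [List.foldl_cons, pvPrefixStep, ih, pvPrefixList, List.map_cons, List.sum_cons]
      rw [Prod.mk.injEq]
      exact ⟨by simp, by ring⟩

-- pass 2: the fold over zip(items, prefix) produces the running-max list
lemma pv_slack_fold (l : List (String × Int × Int)) :
    ∀ (acc : List Int) (m p : Int),
    ((l.zip (pvPrefixList p l)).foldl pvSlackStep (acc, m)).1 = acc ++ pvSlackList m p l := by
  induction l with
  | nil => intro acc m p; simp [pvPrefixList, pvSlackList]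
  | cons kv l ih =>
      intro acc m p
      simp only [pvPrefixList, pvSlackList, List.zip_cons_cons, List.foldl_cons, pvSlackStep]
      rw [ih]
      simp

-- the closed form: zip(items, prefix, slack) mapped to (pid, p+m, burst) IS the schedule
lemma pv_zip_sched (l : List (String × Int × Int)) :
    ∀ (p m : Int),
    (l.zip ((pvPrefixList p l).zip (pvSlackList m p l))).map
        (fun x => (x.1.1, x.2.1 + x.2.2, x.1.2.2))
      = pvSched (p + m) l := by
  induction l with
  | nil => intro p m; rfl
  | cons kv l ih =>
      intro p m
      simp only [pvPrefixList, pvSlackList, List.zip_cons_cons, List.map_cons, pvSched]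
      have h1 : p + max m (kv.2.1 - p) = max (p + m) kv.2.1 := by omega
      have h2 : max (p + m) kv.2.1 + kv.2.2 = (p + kv.2.2) + max m (kv.2.1 - p) := by omega
      rw [h1, h2, ← ih (p + kv.2.2) (max m (kv.2.1 - p))]

-- a foldl of inserts: a key not among the remaining keys keeps its binding
lemma pv_insertfold_frozen (sch : List (String × Int × Int)) :
    ∀ (d : PySem.Dict String Int) (q : String), q ∉ sch.map Prod.fst →
    (sch.foldl (fun d x => d.insert x.1 x.2.1) d).get? q = d.get? q := by
  induction sch with
  | nil => intro _ _ _; rfl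
  | cons x sch ih =>
      intro d q hq
      simp only [List.map_cons, List.mem_cons, not_or] at hq
      simp only [List.foldl_cons]
      rw [ih _ _ hq.2, PySem.Dict.get?_insert_of_ne _ _ hq.1]

-- … and with distinct keys each entry is bound to its own start
lemma pv_insertfold_get (sch : List (String × Int × Int)) :
    ∀ (d : PySem.Dict String Int) (p : String) (s b : Int),
    (sch.map Prod.fst).Nodup → (p, s, b) ∈ sch →
    (sch.foldl (fun d x => d.insert x.1 x.2.1) d).get? p = some s := by
  induction sch with
  | nil => intro _ _ _ _ _ h; cases h
  | cons x sch ih =>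
      intro d p s b hnd hmem
      simp only [List.map_cons, List.nodup_cons] at hnd
      rcases List.mem_cons.1 hmem with hmem | hmem
      · subst hmem
        simp only [List.foldl_cons]
        rw [pv_insertfold_frozen _ _ _ hnd.1, PySem.Dict.get?_insert_self]
      · exact ih _ _ _ b hnd.2 hmem

-- B's timeline map over items equals the schedule's timeline, given the starts lookups
lemma pv_timeline_map (d : PySem.Dict String Int) (l : List (String × Int × Int)) :
    ∀ (t : Int),
    (∀ p s b, (p, s, b) ∈ pvSched t l → d.get? p = some s) →
    l.map (fun kv => (d.getD kv.1 0, d.getD kv.1 0 + kv.2.2, kv.1))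
      = (pvSched t l).map (fun x => (x.2.1, x.2.1 + x.2.2, x.1)) := by
  induction l with
  | nil => intro _ _; rfl
  | cons kv l ih =>
      intro t h
      simp only [pvSched, List.map_cons]
      have hd : d.get? kv.1 = some (max t kv.2.1) :=
        h kv.1 _ kv.2.2 (List.mem_cons_self ..)
      rw [PySem.Dict.getD_eq_get?_getD, hd, Option.getD_some,
          ih (max t kv.2.1 + kv.2.2) (fun p s b hm => h p s b (List.mem_cons_of_mem _ hm))]

-- a lookup at a key the rest of A's loop never touches is unchanged (first_start) …
lemma pv_afold_get_frozen_fs (l : List (String × Int × Int)) :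
    ∀ (t : Int) (tl : List (Int × Int × String)) (fs comp : PySem.Dict String Int) (p : String),
    p ∉ l.map Prod.fst → (l.foldl pvAStep (t, tl, fs, comp)).2.2.1.get? p = fs.get? p := by
  induction l with
  | nil => intro _ _ _ _ _ _; rfl
  | cons kv l ih =>
      intro t tl fs comp p hp
      simp only [List.map_cons, List.mem_cons, not_or] at hp
      simp only [List.foldl_cons, pvAStep]
      rw [ih _ _ _ _ _ hp.2, PySem.Dict.get?_setdefault_of_ne _ _ hp.1]

-- … and A's completion dict
lemma pv_afold_get_frozen_comp (l : List (String × Int × Int)) :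
    ∀ (t : Int) (tl : List (Int × Int × String)) (fs comp : PySem.Dict String Int) (p : String),
    p ∉ l.map Prod.fst → (l.foldl pvAStep (t, tl, fs, comp)).2.2.2.get? p = comp.get? p := by
  induction l with
  | nil => intro _ _ _ _ _ _; rfl
  | cons kv l ih =>
      intro t tl fs comp p hp
      simp only [List.map_cons, List.mem_cons, not_or] at hp
      simp only [List.foldl_cons, pvAStep]
      rw [ih _ _ _ _ _ hp.2, PySem.Dict.get?_insert_of_ne _ _ hp.1]

-- A's first_start / completion dicts record the start and end times of the schedule
lemma pv_afold_get (l : List (String × Int × Int)) :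
    ∀ (t : Int) (tl : List (Int × Int × String)) (fs comp : PySem.Dict String Int)
      (p : String) (s b : Int),
    (l.map Prod.fst).Nodup → (∀ q ∈ l.map Prod.fst, fs.contains q = false) →
    (p, s, b) ∈ pvSched t l →
    (l.foldl pvAStep (t, tl, fs, comp)).2.2.1.get? p = some s ∧
    (l.foldl pvAStep (t, tl, fs, comp)).2.2.2.get? p = some (s + b) := by
  induction l with
  | nil => intro _ _ _ _ _ _ _ _ _ h; cases h
  | cons kv l ih =>
      intro t tl fs comp p s b hnd hfs hmem
      simp only [List.map_cons, List.nodup_cons] at hnd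
      have hfk : fs.contains kv.1 = false := hfs kv.1 (by simp)
      simp only [pvSched] at hmem
      rcases List.mem_cons.1 hmem with hmem | hmem
      · simp only [Prod.mk.injEq] at hmem
        obtain ⟨h1, h2, h3⟩ := hmem
        subst h1; subst h2; subst h3
        simp only [List.foldl_cons, pvAStep, pv_if_eq_max]
        rw [pv_afold_get_frozen_fs l _ _ _ _ _ hnd.1,
            pv_afold_get_frozen_comp l _ _ _ _ _ hnd.1,
            PySem.Dict.setdefault_of_not_contains _ _ hfk,
            PySem.Dict.get?_insert_self, PySem.Dict.get?_insert_self]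
        exact ⟨rfl, rfl⟩
      · simp only [List.foldl_cons, pvAStep, pv_if_eq_max]
        refine ih _ _ _ _ p s b hnd.2 ?_ hmem
        intro q hq
        have hqk : q ≠ kv.1 := fun h => hnd.1 (h ▸ hq)
        rw [PySem.Dict.contains_setdefault]
        simp [hqk, hfs q (by simp [hq])]

-- ===== VERDICT (by name: the statement is the Claim_ definition above) =====
theorem fcfs_schedule_spec : Claim_equal_fcfs_schedule := by
  intro processes _ hpre
  unfold Spec_fcfs_schedule fcfs_schedule fcfs_schedule_alt
  simp only []
  set items := PySem.List.sorted2 processes (fun kv => kv.2.1) (fun kv => kv.1) with hitems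
  have hperm : items.Perm processes := PySem.List.sorted2_perm ..
  have hnd : (items.map Prod.fst).Nodup := ((hperm.map Prod.fst).nodup_iff).2 hpre
  -- B's staged passes compute pvSched 0 items
  have hpl : (items.foldl pvPrefixStep ([], 0)).1 = pvPrefixList 0 items := by
    rw [pv_prefix_fold]; simp
  have hsl : ((items.zip (items.foldl pvPrefixStep ([], 0)).1).foldl pvSlackStep ([], 0)).1
      = pvSlackList 0 0 items := by
    rw [hpl, pv_slack_fold]; simp
  -- B's starts dict, rewritten as an insert-fold over pvSched 0 items
  have hfold :
      (items.zip ((pvPrefixList 0 items).zip (pvSlackList 0 0 items))).foldl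
          (fun d x => d.insert x.1.1 (x.2.1 + x.2.2)) (PySem.Dict.empty : PySem.Dict String Int)
        = (pvSched 0 items).foldl (fun d x => d.insert x.1 x.2.1) PySem.Dict.empty := by
    have hz := pv_zip_sched items 0 0
    norm_num at hz
    rw [← hz, List.foldl_map]
  have hschnd : ((pvSched 0 items).map Prod.fst).Nodup := by
    rw [pv_sched_fst]; exact hnd
  have hget : ∀ p s b, (p, s, b) ∈ pvSched 0 items →
      ((items.zip ((pvPrefixList 0 items).zip (pvSlackList 0 0 items))).foldl
          (fun d x => d.insert x.1.1 (x.2.1 + x.2.2))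
          (PySem.Dict.empty : PySem.Dict String Int)).get? p = some s := by
    intro p s b hm
    rw [hfold]
    exact pv_insertfold_get _ _ _ _ b hschnd hm
  rw [hsl, hpl]
  set starts := (items.zip ((pvPrefixList 0 items).zip (pvSlackList 0 0 items))).foldl
      (fun d x => d.insert x.1.1 (x.2.1 + x.2.2)) (PySem.Dict.empty : PySem.Dict String Int)
      with hstarts
  refine Prod.ext ?_ ?_
  · -- timelines
    show PySem.List.sorted _ _ = PySem.List.sorted _ _
    congr 1
    rw [pv_afold_timeline items 0 [] PySem.Dict.empty PySem.Dict.empty, List.nil_append]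
    exact (pv_timeline_map starts items 0 hget).symm
  · -- metrics
    show (_ : PySem.Dict String (List (String × Int))).items = _
    rw [PySem.Dict.items_foldl_insert_fresh _ _ _ _
          (fun a _ => PySem.Dict.contains_empty _) hpre]
    have hemp : (PySem.Dict.empty : PySem.Dict String (List (String × Int))).items = [] := rfl
    rw [hemp, List.nil_append]
    refine List.map_congr_left ?_
    intro kv hkv
    have hkv' : kv ∈ items := hperm.mem_iff.2 hkv
    obtain ⟨s, hs⟩ := pv_mem_sched items 0 kv hkv'
    obtain ⟨hfs, hcomp⟩ := pv_afold_get items 0 [] PySem.Dict.empty PySem.Dict.empty kv.1 s kv.2.2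
        hnd (fun q _ => PySem.Dict.contains_empty _) hs
    have hst := hget kv.1 s kv.2.2 hs
    simp only [PySem.Dict.getD_eq_get?_getD, hfs, hcomp, hst, Option.getD_some]
    have harith : s + kv.2.2 - kv.2.1 - kv.2.2 = s - kv.2.1 := by ring
    rw [harith]
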